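-- pv_equiv track=rewrite | github.com/JunjieNian/CubeClosure | .ipynb_checkpoints/cube_closed_system-checkpoint.py | apply_stage
-- ===== SOURCE A (Python) =====
-- def apply_stage(points, perm, axis):
--     out = []
--     for x, y, z in points:
--         if axis == 0:
--             out.append((perm[x], y, z))
--         elif axis == 1:
--             out.append((x, perm[y], z))
--         else:
--             out.append((x, y, perm[z]))
--     return out
-- ===== SOURCE B (Python) =====
-- def apply_stage(points, perm, axis):
--     # Columnar/staged approach: split points into three coordinate columns,
--     # permute exactly one whole column, then zip the columns back together.
--     xs = [p[0] for p in points]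
--     ys = [p[1] for p in points]
--     zs = [p[2] for p in points]
--     if axis == 0:
--         xs = [perm[v] for v in xs]
--     elif axis == 1:
--         ys = [perm[v] for v in ys]
--     else:
--         zs = [perm[v] for v in zs]
--     return list(zip(xs, ys, zs))
-- ===== Notes on version B (the rewrite author's own statement) =====
-- stated objective: alternative
-- what changed: Replaces A's single pass with per-point branching by a columnar pipeline: split points into three coordinate columns, permute one entire column chosen by axis, and zip the columns back into triples.
import Mathlib
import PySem

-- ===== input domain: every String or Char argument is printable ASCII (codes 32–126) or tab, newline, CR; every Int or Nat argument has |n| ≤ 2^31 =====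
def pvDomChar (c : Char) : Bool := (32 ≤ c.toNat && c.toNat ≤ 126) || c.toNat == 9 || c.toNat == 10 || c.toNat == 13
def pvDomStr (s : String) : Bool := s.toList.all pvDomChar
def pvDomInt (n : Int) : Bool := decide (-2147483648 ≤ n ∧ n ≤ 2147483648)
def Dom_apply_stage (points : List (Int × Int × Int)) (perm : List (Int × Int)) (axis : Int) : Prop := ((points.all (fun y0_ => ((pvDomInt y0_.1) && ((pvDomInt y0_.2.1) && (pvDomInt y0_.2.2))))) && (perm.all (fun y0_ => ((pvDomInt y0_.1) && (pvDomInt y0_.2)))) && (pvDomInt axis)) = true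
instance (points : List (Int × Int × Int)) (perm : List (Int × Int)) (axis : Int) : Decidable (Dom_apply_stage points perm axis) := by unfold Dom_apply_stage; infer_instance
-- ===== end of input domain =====

-- ===== PORT A =====
-- B replaces A's single branching pass by a columnar pipeline (split columns, permute one column, zip back); same cost ('alternative').
-- perm[k] on a Python dict: first-match association-list lookup; Pre_ excludes missing keys (KeyError), so the .getD 0 default is never reached inside Pre_.
def apply_stage (points : List (Int × Int × Int)) (perm : List (Int × Int)) (axis : Int) : List (Int × Int × Int) :=
  points.foldl (fun out p =>
    if axis = 0 then out ++ [(((perm.lookup p.1).getD 0), p.2.1, p.2.2)]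
    else if axis = 1 then out ++ [(p.1, (perm.lookup p.2.1).getD 0, p.2.2)]
    else out ++ [(p.1, p.2.1, (perm.lookup p.2.2).getD 0)]) []

-- ===== PORT B =====
def apply_stage_alt (points : List (Int × Int × Int)) (perm : List (Int × Int)) (axis : Int) : List (Int × Int × Int) :=
  let xs := points.map (fun p => p.1)
  let ys := points.map (fun p => p.2.1)
  let zs := points.map (fun p => p.2.2)
  let f := fun v => (perm.lookup v).getD 0
  if axis = 0 then (xs.map f).zip (ys.zip zs)
  else if axis = 1 then xs.zip ((ys.map f).zip zs)
  else xs.zip (ys.zip (zs.map f))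

-- ===== PRECONDITION & SPEC =====
-- Pre_ excludes exactly the inputs where Python A raises KeyError: some point whose
-- coordinate selected by axis (fallthrough: any axis outside {0,1} selects z) is not a key of perm.
def Pre_apply_stage (points : List (Int × Int × Int)) (perm : List (Int × Int)) (axis : Int) : Prop :=
  ∀ p ∈ points, (if axis = 0 then p.1 else if axis = 1 then p.2.1 else p.2.2) ∈ perm.map Prod.fst
instance (points : List (Int × Int × Int)) (perm : List (Int × Int)) (axis : Int) : Decidable (Pre_apply_stage points perm axis) := by unfold Pre_apply_stage; infer_instance
def pvWitness_apply_stage : (List (Int × Int × Int)) × (List (Int × Int)) × Int := ([(0, 1, 2), (1, 0, 2)], [(0, 1), (1, 0), (2, 2)], 0)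
def Spec_apply_stage (points : List (Int × Int × Int)) (perm : List (Int × Int)) (axis : Int) (out : List (Int × Int × Int)) : Prop := out = apply_stage_alt points perm axis
instance (points : List (Int × Int × Int)) (perm : List (Int × Int)) (axis : Int) (out : List (Int × Int × Int)) : Decidable (Spec_apply_stage points perm axis out) := by unfold Spec_apply_stage; infer_instance

-- ===== CLAIM (what is proved, stated in full; the proofs are below) =====
def Claim_equal_apply_stage : Prop := ∀ (points : List (Int × Int × Int)) (perm : List (Int × Int)) (axis : Int), Dom_apply_stage points perm axis → Pre_apply_stage points perm axis → Spec_apply_stage points perm axis (apply_stage points perm axis)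

-- ===== LEMMAS AND PROOFS =====
-- zipping three mapped columns of one list is mapping the triple of projections
theorem zip3_map_columns {α : Type} (f g h : (Int × Int × Int) → α) (l : List (Int × Int × Int)) :
    (l.map f).zip ((l.map g).zip (l.map h)) = l.map (fun p => (f p, g p, h p)) := by
  induction l with
  | nil => simp
  | cons p ps ih => simp [ih]

theorem apply_stage_acc (points : List (Int × Int × Int)) (perm : List (Int × Int)) (axis : Int) (acc : List (Int × Int × Int)) :
    points.foldl (fun out p =>
      if axis = 0 then out ++ [(((perm.lookup p.1).getD 0), p.2.1, p.2.2)]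
      else if axis = 1 then out ++ [(p.1, (perm.lookup p.2.1).getD 0, p.2.2)]
      else out ++ [(p.1, p.2.1, (perm.lookup p.2.2).getD 0)]) acc
    = acc ++ points.map (fun p =>
        if axis = 0 then (((perm.lookup p.1).getD 0), p.2.1, p.2.2)
        else if axis = 1 then (p.1, (perm.lookup p.2.1).getD 0, p.2.2)
        else (p.1, p.2.1, (perm.lookup p.2.2).getD 0)) := by
  induction points generalizing acc with
  | nil => simp
  | cons p ps ih =>
    simp only [List.foldl_cons, List.map_cons]
    rw [ih]
    by_cases h0 : axis = 0
    · simp [h0]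
    · by_cases h1 : axis = 1 <;> simp [h0, h1]

-- ===== VERDICT (by name: the statement is the Claim_ definition above) =====
theorem apply_stage_spec : Claim_equal_apply_stage := by
  intro points perm axis _ _
  unfold Spec_apply_stage apply_stage apply_stage_alt
  rw [apply_stage_acc]
  by_cases h0 : axis = 0
  · simp [h0, zip3_map_columns]
  · by_cases h1 : axis = 1 <;> simp [h0, h1, zip3_map_columns]
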